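-- pv_equiv track=rewrite | github.com/kuzudb/kuzu | tools/python_api/to_panda.py | get_target_col_ids
-- ===== SOURCE A (Python) =====
-- def get_target_col_ids(name_list, col_names, is_node_name=True):
--     target_col_ids = []
--     for name in name_list:
--         for i in range(0, len(col_names)):
--             if is_node_name and col_names[i].startswith(name):
--                 target_col_ids.append(i)
--             elif not is_node_name and col_names[i] == name:
--                 target_col_ids.append(i)
--     return target_col_ids
-- ===== SOURCE B (Python) =====
-- def get_target_col_ids(name_list, col_names, is_node_name=True):
--     # Build a hash index once: in node mode every prefix of a column name is a key,
--     # in equality mode the column name itself; each key maps to its column indices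
--     # in increasing order.  Then each requested name is a single dict lookup.
--     index = {}
--     for i, col in enumerate(col_names):
--         if is_node_name:
--             for j in range(len(col) + 1):
--                 index.setdefault(col[:j], []).append(i)
--         else:
--             index.setdefault(col, []).append(i)
--     target_col_ids = []
--     for name in name_list:
--         target_col_ids.extend(index.get(name, []))
--     return target_col_ids
-- ===== Notes on version B (the rewrite author's own statement) =====
-- stated objective: faster
-- what changed: Replaces A's nested name-by-column scan with a hash index built once over the columns (keyed by every prefix of each column name in node mode, by the name itself otherwise), so each requested name is a single dict lookup instead of a full scan of col_names.
import Mathlib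
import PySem

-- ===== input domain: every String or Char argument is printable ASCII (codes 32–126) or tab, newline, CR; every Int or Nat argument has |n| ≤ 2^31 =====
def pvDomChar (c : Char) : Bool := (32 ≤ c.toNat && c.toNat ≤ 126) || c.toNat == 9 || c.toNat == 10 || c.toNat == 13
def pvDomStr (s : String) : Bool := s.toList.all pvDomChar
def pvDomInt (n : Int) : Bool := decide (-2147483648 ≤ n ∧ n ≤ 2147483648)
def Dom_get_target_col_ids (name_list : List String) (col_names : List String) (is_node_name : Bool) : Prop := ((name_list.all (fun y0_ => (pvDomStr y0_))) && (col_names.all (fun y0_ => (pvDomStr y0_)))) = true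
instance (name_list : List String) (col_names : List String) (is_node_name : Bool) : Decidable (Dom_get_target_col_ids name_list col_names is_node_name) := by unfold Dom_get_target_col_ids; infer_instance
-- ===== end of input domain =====

-- B replaces A's nested name×column scan by a hash index built once over the column
-- names (in node mode keyed by every prefix of each column name), so each requested
-- name becomes a single dict lookup; return values are identical.

-- ===== PORT A =====
def get_target_col_ids (name_list : List String) (col_names : List String) (is_node_name : Bool) : List Int :=
  name_list.foldl (fun target_col_ids name =>
    (PySem.List.pyRange 0 (PySem.List.len col_names)).foldl (fun target_col_ids i =>
      if is_node_name && PySem.Str.startswith (PySem.List.pyGetD col_names i "") name then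
        target_col_ids ++ [i]
      else if !is_node_name && (PySem.List.pyGetD col_names i "" == name) then
        target_col_ids ++ [i]
      else
        target_col_ids) target_col_ids) []

-- ===== PORT B =====
-- 'index.setdefault(key, []).append(i)' is ported as Dict.modify key [] (· ++ [i])
-- (create-if-absent then append), exactly Python's in-place mutation of the bucket.
def pvPrefixIndex (col_names : List String) (is_node_name : Bool) : PySem.Dict String (List Int) :=
  (PySem.List.enumerate col_names).foldl (fun index p =>
    if is_node_name then
      (PySem.List.pyRange 0 (PySem.Str.len p.2 + 1)).foldl
        (fun index j => index.modify (PySem.Str.slice p.2 none (some j)) [] (fun l => l ++ [p.1])) index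
    else
      index.modify p.2 [] (fun l => l ++ [p.1])) PySem.Dict.empty

def get_target_col_ids_alt (name_list : List String) (col_names : List String) (is_node_name : Bool) : List Int :=
  let index := pvPrefixIndex col_names is_node_name
  name_list.foldl (fun target_col_ids name => target_col_ids ++ index.getD name []) []

-- ===== PRECONDITION & SPEC =====
def Spec_get_target_col_ids (name_list : List String) (col_names : List String) (is_node_name : Bool) (out : List Int) : Prop := out = get_target_col_ids_alt name_list col_names is_node_name
instance (name_list : List String) (col_names : List String) (is_node_name : Bool) (out : List Int) : Decidable (Spec_get_target_col_ids name_list col_names is_node_name out) := by unfold Spec_get_target_col_ids; infer_instance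

-- ===== CLAIM (what is proved, stated in full; the proofs are below) =====
def Claim_equal_get_target_col_ids : Prop := ∀ (name_list : List String) (col_names : List String) (is_node_name : Bool), Dom_get_target_col_ids name_list col_names is_node_name → Spec_get_target_col_ids name_list col_names is_node_name (get_target_col_ids name_list col_names is_node_name)

-- ===== LEMMAS AND PROOFS =====

-- the match condition both programs implement, per (column value, requested name)
def pvHit (is_node_name : Bool) (col name : String) : Bool :=
  if is_node_name then PySem.Str.startswith col name else col == name

-- inner prefix loop of B: the bucket of k gains one copy of i per j with col[:j] = k
lemma pvInner (col : String) (i : Int) (js : List Int) (d : PySem.Dict String (List Int)) (k : String) :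
    (js.foldl (fun d j => d.modify (PySem.Str.slice col none (some j)) [] (fun l => l ++ [i])) d).getD k []
      = d.getD k [] ++ List.replicate (js.countP (fun j => PySem.Str.slice col none (some j) == k)) i := by
  induction js generalizing d with
  | nil => simp
  | cons j js ih =>
    simp only [List.foldl_cons, ih, PySem.Dict.getD_modify, List.countP_cons]
    by_cases h : PySem.Str.slice col none (some j) == k
    · have hk : k = PySem.Str.slice col none (some j) := (beq_iff_eq.mp h).symm
      simp [hk]
      rw [List.replicate_succ]
    · have hk : ¬ k = PySem.Str.slice col none (some j) := fun e => h (beq_iff_eq.mpr e.symm)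
      simp [hk, h]

-- exactly one prefix of col equals k iff col starts with k
lemma pvCount (col k : String) :
    (PySem.List.pyRange 0 (PySem.Str.len col + 1)).countP (fun j => PySem.Str.slice col none (some j) == k)
      = if PySem.Str.startswith col k then 1 else 0 := by
  have hslice : ∀ j : Nat, (PySem.Str.slice col none (some (j : Int))).toList = col.toList.take j := by
    intro j
    simp [PySem.Str.toList_slice, PySem.Chars.slice_eq_listSlice, PySem.List.slice_to_natCast]
  have hlen : PySem.Str.len col + 1 = ((col.toList.length + 1 : Nat) : Int) := by
    simp [PySem.Str.len_eq]
  rw [hlen, PySem.List.pyRange_zero_natCast, List.countP_map]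
  have hpt : ∀ j ∈ List.range (col.toList.length + 1),
      (((fun j => PySem.Str.slice col none (some j) == k) ∘ fun k : Nat => (k : Int)) j = true
        ↔ ((j == k.toList.length) && decide (col.toList.take k.toList.length = k.toList)) = true) := by
    intro j hj
    have hjle : j ≤ col.toList.length := by have := List.mem_range.mp hj; omega
    simp only [Function.comp_apply, beq_iff_eq, Bool.and_eq_true, decide_eq_true_eq]
    constructor
    · intro h
      have htake : col.toList.take j = k.toList := by rw [← hslice j, h]
      have hj' : j = k.toList.length := by rw [← htake, List.length_take]; omega
      exact ⟨hj', by rw [← hj']; exact htake⟩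
    · rintro ⟨hj', htake⟩
      apply String.ext
      rw [hslice j, hj']
      exact htake
  rw [List.countP_congr hpt]
  by_cases hpre : col.toList.take k.toList.length = k.toList
  · have hkle : k.toList.length ≤ col.toList.length := by
      have := congrArg List.length hpre
      rw [List.length_take] at this
      omega
    have hsw : PySem.Str.startswith col k = true := by
      rw [PySem.Str.startswith_eq, PySem.Chars.startswith_iff, List.prefix_iff_eq_take]
      exact hpre.symm
    rw [hsw, if_pos rfl]
    have hq : (fun j => (j == k.toList.length) && decide (col.toList.take k.toList.length = k.toList))
        = fun j : Nat => j == k.toList.length := by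
      funext j; rw [decide_eq_true hpre, Bool.and_true]
    rw [hq]
    rw [show List.countP (fun j : Nat => j == k.toList.length) (List.range (col.toList.length + 1))
        = List.count k.toList.length (List.range (col.toList.length + 1)) from rfl]
    rw [List.count_range, if_pos (Nat.lt_succ_of_le hkle)]
  · have hsw : PySem.Str.startswith col k = false := by
      rw [← Bool.not_eq_true, PySem.Str.startswith_eq, PySem.Chars.startswith_iff,
        List.prefix_iff_eq_take]
      exact fun he => hpre he.symm
    rw [hsw, if_neg Bool.false_ne_true]
    refine List.countP_eq_zero.mpr ?_
    intro a _
    simp only [Bool.and_eq_true, beq_iff_eq, decide_eq_true_eq, not_and]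
    exact fun _ => hpre

-- the dict built by B: bucket of k = indices of matching columns, in order
lemma pvDictFold (is_node_name : Bool) (ps : List (Int × String)) (d : PySem.Dict String (List Int)) (k : String) :
    ((ps.foldl (fun index p =>
        if is_node_name then
          (PySem.List.pyRange 0 (PySem.Str.len p.2 + 1)).foldl
            (fun index j => index.modify (PySem.Str.slice p.2 none (some j)) [] (fun l => l ++ [p.1])) index
        else
          index.modify p.2 [] (fun l => l ++ [p.1])) d).getD k [])
      = d.getD k [] ++ ((ps.filter (fun p => pvHit is_node_name p.2 k)).map (·.1)) := by
  induction ps generalizing d with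
  | nil => simp
  | cons p ps ih =>
    simp only [List.foldl_cons, ih, List.filter_cons]
    cases is_node_name with
    | true =>
      rw [if_pos rfl, pvInner, pvCount]
      by_cases h : PySem.Chars.startswith p.2.toList k.toList
      · simp [pvHit, h, List.append_assoc]
      · simp [pvHit, h]
    | false =>
      rw [if_neg (by simp), PySem.Dict.getD_modify]
      by_cases h : p.2 == k
      · have hk : k = p.2 := (beq_iff_eq.mp h).symm
        simp [pvHit, ← hk, List.append_assoc]
      · have hk : ¬ k = p.2 := fun e => by simp [e] at h
        simp [pvHit, h, hk]

lemma pvIndexGetD (col_names : List String) (is_node_name : Bool) (k : String) :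
    (pvPrefixIndex col_names is_node_name).getD k []
      = (PySem.List.pyRange 0 (PySem.List.len col_names)).filter
          (fun i => pvHit is_node_name (PySem.List.pyGetD col_names i "") k) := by
  unfold pvPrefixIndex
  rw [pvDictFold, PySem.List.enumerate_eq_map_pyRange col_names "", List.filter_map, List.map_map]
  simp [Function.comp_def]

-- A's inner loop over the columns is the same filter
lemma pvAInner (col_names : List String) (is_node_name : Bool) (name : String) (acc : List Int) :
    ((PySem.List.pyRange 0 (PySem.List.len col_names)).foldl (fun target_col_ids i =>
      if is_node_name && PySem.Str.startswith (PySem.List.pyGetD col_names i "") name then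
        target_col_ids ++ [i]
      else if !is_node_name && (PySem.List.pyGetD col_names i "" == name) then
        target_col_ids ++ [i]
      else
        target_col_ids) acc)
      = acc ++ (PySem.List.pyRange 0 (PySem.List.len col_names)).filter
          (fun i => pvHit is_node_name (PySem.List.pyGetD col_names i "") name) := by
  cases is_node_name with
  | true =>
    rw [show (fun (target_col_ids : List Int) (i : Int) =>
        if true && PySem.Str.startswith (PySem.List.pyGetD col_names i "") name then
          target_col_ids ++ [i]
        else if !true && (PySem.List.pyGetD col_names i "" == name) then
          target_col_ids ++ [i]
        else
          target_col_ids)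
        = fun (target_col_ids : List Int) (i : Int) =>
          if PySem.Str.startswith (PySem.List.pyGetD col_names i "") name then
            target_col_ids ++ [i]
          else target_col_ids from by funext t i; simp]
    rw [PySem.List.foldl_append_if_eq_filter]
    simp [pvHit]
  | false =>
    rw [show (fun (target_col_ids : List Int) (i : Int) =>
        if false && PySem.Str.startswith (PySem.List.pyGetD col_names i "") name then
          target_col_ids ++ [i]
        else if !false && (PySem.List.pyGetD col_names i "" == name) then
          target_col_ids ++ [i]
        else
          target_col_ids)
        = fun (target_col_ids : List Int) (i : Int) =>
          if PySem.List.pyGetD col_names i "" == name then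
            target_col_ids ++ [i]
          else target_col_ids from by funext t i; simp]
    rw [PySem.List.foldl_append_if_eq_filter]
    simp [pvHit]

-- both programs equal the same flatMap of per-name filters
lemma pvAeq (name_list col_names : List String) (is_node_name : Bool) :
    get_target_col_ids name_list col_names is_node_name
      = name_list.flatMap (fun name => (PySem.List.pyRange 0 (PySem.List.len col_names)).filter
          (fun i => pvHit is_node_name (PySem.List.pyGetD col_names i "") name)) := by
  unfold get_target_col_ids
  rw [show (fun (target_col_ids : List Int) (name : String) =>
      (PySem.List.pyRange 0 (PySem.List.len col_names)).foldl (fun target_col_ids i =>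
        if is_node_name && PySem.Str.startswith (PySem.List.pyGetD col_names i "") name then
          target_col_ids ++ [i]
        else if !is_node_name && (PySem.List.pyGetD col_names i "" == name) then
          target_col_ids ++ [i]
        else
          target_col_ids) target_col_ids)
      = fun (target_col_ids : List Int) (name : String) =>
        target_col_ids ++ (PySem.List.pyRange 0 (PySem.List.len col_names)).filter
          (fun i => pvHit is_node_name (PySem.List.pyGetD col_names i "") name)
    from funext fun acc => funext fun name => pvAInner col_names is_node_name name acc]
  rw [PySem.List.foldl_append_eq_flatMap]
  simp

lemma pvBeq (name_list col_names : List String) (is_node_name : Bool) :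
    get_target_col_ids_alt name_list col_names is_node_name
      = name_list.flatMap (fun name => (PySem.List.pyRange 0 (PySem.List.len col_names)).filter
          (fun i => pvHit is_node_name (PySem.List.pyGetD col_names i "") name)) := by
  show name_list.foldl (fun target_col_ids name =>
      target_col_ids ++ (pvPrefixIndex col_names is_node_name).getD name []) [] = _
  rw [show (fun (target_col_ids : List Int) (name : String) =>
      target_col_ids ++ (pvPrefixIndex col_names is_node_name).getD name [])
      = fun (target_col_ids : List Int) (name : String) =>
        target_col_ids ++ (PySem.List.pyRange 0 (PySem.List.len col_names)).filter
          (fun i => pvHit is_node_name (PySem.List.pyGetD col_names i "") name)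
    from funext fun acc => funext fun name => by rw [pvIndexGetD]]
  rw [PySem.List.foldl_append_eq_flatMap]
  simp

-- ===== VERDICT (by name: the statement is the Claim_ definition above) =====
theorem get_target_col_ids_spec : Claim_equal_get_target_col_ids := by
  intro name_list col_names is_node_name _
  unfold Spec_get_target_col_ids
  rw [pvAeq, pvBeq]
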